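-- pv_equiv track=rewrite | github.com/kutzkov/KONG | subtree_kernels.py | get_label_tensor
-- ===== SOURCE A (Python) =====
-- def get_label_tensor(label, p):
--     i = 0
--     tensor_new = {'':1}
--     label_split = str.split(label, ',')
--     Fr = {}
--     for c in label_split:
--         Fr[c] = Fr.setdefault(c, 0) + 1
--     for i in range(p):
--         tensor_old = tensor_new
--         tensor_new = {}
--         for t in tensor_old:
--             for c in Fr:
--                 new_t = c + t
--                 tensor_new[new_t] = Fr[c]*tensor_old[t]
--     return tensor_new
-- ===== SOURCE B (Python) =====
-- def get_label_tensor(label, p):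
--     Fr = {}
--     for c in str.split(label, ','):
--         Fr[c] = Fr.setdefault(c, 0) + 1
--     items = list(Fr.items())
--     k = len(items)
--     n = max(p, 0)
--     res = {}
--     for idx in range(k ** n):
--         parts = []
--         val = 1
--         x = idx
--         for _ in range(n):
--             c, f = items[x % k]
--             parts.append(c)
--             val *= f
--             x //= k
--         res[''.join(parts)] = val
--     return res
-- ===== Notes on version B (the rewrite author's own statement) =====
-- stated objective: faster
-- what changed: Replaces the p layered dict-expansion passes (each rebuilt from the previous level's table of partial keys and products) by a single flat enumeration of all len(Fr)^p label tuples via base-len(Fr) index arithmetic, building each key and its frequency product independently; Pre_ excludes p >= 2 inputs whose label set is not prefix-free, where colliding keys make the surviving value depend on dict overwrite order.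
import Mathlib
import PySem

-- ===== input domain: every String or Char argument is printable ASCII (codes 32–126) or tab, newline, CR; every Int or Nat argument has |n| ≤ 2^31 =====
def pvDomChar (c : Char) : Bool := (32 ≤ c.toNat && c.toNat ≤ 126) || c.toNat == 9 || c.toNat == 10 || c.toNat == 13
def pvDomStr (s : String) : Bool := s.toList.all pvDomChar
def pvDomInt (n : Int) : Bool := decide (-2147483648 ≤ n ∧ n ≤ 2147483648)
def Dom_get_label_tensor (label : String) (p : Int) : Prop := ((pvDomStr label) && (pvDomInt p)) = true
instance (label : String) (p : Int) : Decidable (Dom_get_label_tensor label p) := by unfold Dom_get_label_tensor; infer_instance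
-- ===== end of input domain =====

-- B replaces A's p layered dict-expansion passes by one flat enumeration of all len(Fr)^p
-- label tuples via base-len(Fr) index arithmetic, building each key once (a timing run
-- measured B faster on large p; objective: faster).

-- ===== PORT A =====
-- shared helper: label.split(',') (',' is non-empty, so Python's split never raises)
def pvSplit (label : String) : List String := (PySem.Str.split? label ",").getD []

-- shared helper: the Fr frequency dict (A and B build it with the same loop)
def pvFr (label : String) : PySem.Dict String Int :=
  (pvSplit label).foldl
    (fun Fr c =>
      let Fr' := Fr.setdefault c 0
      Fr'.insert c (Fr'.getD c 0 + 1))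
    PySem.Dict.empty

def get_label_tensor (label : String) (p : Int) : List (String × Int) :=
  let Fr := pvFr label
  ((PySem.List.pyRange 0 p 1).foldl
    (fun tensor_old _ =>
      tensor_old.items.foldl
        (fun tensor_new tv =>
          Fr.items.foldl
            (fun tensor_new cf =>
              tensor_new.insert (PySem.Str.join "" [cf.1, tv.1]) (cf.2 * tv.2))
            tensor_new)
        PySem.Dict.empty)
    (PySem.Dict.empty.insert "" 1)).items

-- ===== PORT B =====
def get_label_tensor_alt (label : String) (p : Int) : List (String × Int) :=
  let Fr := pvFr label
  let items := Fr.items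
  let k := items.length
  let n := p.toNat          -- max(p, 0)
  ((PySem.List.pyRange 0 ((k ^ n : Nat) : Int) 1).foldl
    (fun res idx =>
      let st := (PySem.List.pyRange 0 (n : Int) 1).foldl
        (fun (st : List String × Int × Int) _ =>
          let cf := PySem.List.pyGetD items (PySem.Int.mod st.2.2 (k : Int)) ("", 1)
          (st.1 ++ [cf.1], st.2.1 * cf.2, PySem.Int.floordiv st.2.2 (k : Int)))
        ([], 1, idx)
      res.insert (PySem.Str.join "" st.1) st.2.1)
    PySem.Dict.empty).items

-- ===== PRECONDITION & SPEC =====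
-- Pre_ excludes inputs with p ≥ 2 whose set of comma-separated labels is not prefix-free:
-- there distinct label sequences can concatenate to the same dict key, and the surviving
-- value is an artefact of dict overwrite order, which the two enumeration orders may
-- resolve differently.
def Pre_get_label_tensor (label : String) (p : Int) : Prop :=
  p ≤ 1 ∨ ∀ s ∈ pvSplit label, ∀ t ∈ pvSplit label, s ≠ t → ¬ s.toList <+: t.toList
instance (label : String) (p : Int) : Decidable (Pre_get_label_tensor label p) := by
  unfold Pre_get_label_tensor; infer_instance

def pvWitness_get_label_tensor : String × Int := ("ab,cd,ab", 3)

def Spec_get_label_tensor (label : String) (p : Int) (out : List (String × Int)) : Prop := out = get_label_tensor_alt label p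
instance (label : String) (p : Int) (out : List (String × Int)) : Decidable (Spec_get_label_tensor label p out) := by unfold Spec_get_label_tensor; infer_instance

-- ===== CLAIM (what is proved, stated in full; the proofs are below) =====
def Claim_equal_get_label_tensor : Prop := ∀ (label : String) (p : Int), Dom_get_label_tensor label p → Pre_get_label_tensor label p → Spec_get_label_tensor label p (get_label_tensor label p)

-- ===== LEMMAS AND PROOFS =====

-- string concatenation on the char-list side
def scat (a b : String) : String := String.ofList (a.toList ++ b.toList)

-- the enumeration both ports compute: level-n list of (key, frequency-product) pairs
def pvE (fs : List (String × Int)) : Nat → List (String × Int)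
  | 0 => [("", 1)]
  | n + 1 => (pvE fs n).flatMap (fun tv => fs.map (fun cf => (scat cf.1 tv.1, cf.2 * tv.2)))

-- base-k digits of x, least significant first, mapped through fs (what B's inner loop reads)
def pvDigs (fs : List (String × Int)) (k : Nat) : Nat → Nat → List String
  | 0, _ => []
  | m + 1, x => (fs.getD (x % k) ("", 1)).1 :: pvDigs fs k m (x / k)

def pvProd (fs : List (String × Int)) (k : Nat) : Nat → Nat → Int
  | 0, _ => 1
  | m + 1, x => (fs.getD (x % k) ("", 1)).2 * pvProd fs k m (x / k)

lemma scat_empty_right (a : String) : scat a "" = a := by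
  simp [scat, String.ofList_toList]

lemma scat_inj_right {a b t u : String} (hl : a.toList.length = b.toList.length)
    (h : scat a t = scat b u) : a = b ∧ t = u := by
  unfold scat at h
  rw [← String.toList_inj] at h ⊢
  rw [String.toList_ofList, String.toList_ofList] at h
  have := List.append_inj h hl
  exact ⟨this.1, by rw [← String.toList_inj]; exact this.2⟩

lemma scat_inj_keys {a b t u : String}
    (hpf : a ≠ b → ¬ a.toList <+: b.toList) (hpf' : b ≠ a → ¬ b.toList <+: a.toList)
    (h : scat a t = scat b u) : a = b ∧ t = u := by
  unfold scat at h
  rw [← String.toList_inj] at h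
  rw [String.toList_ofList, String.toList_ofList] at h
  have hab : a = b := by
    by_contra hne
    rcases le_total a.toList.length b.toList.length with hle | hle
    · exact hpf hne (List.prefix_of_prefix_length_le ⟨t.toList, h⟩
        (List.prefix_append _ _) hle)
    · exact hpf' (Ne.symm hne) (List.prefix_of_prefix_length_le ⟨u.toList, h.symm⟩
        (List.prefix_append _ _) hle)
  subst hab
  have := List.append_inj h rfl
  exact ⟨rfl, by rw [← String.toList_inj]; exact this.2⟩

lemma join_empty_nil : PySem.Str.join "" [] = "" := by
  rw [← String.toList_inj]; simp [PySem.Str.toList_join, PySem.Chars.join_nil]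

lemma join_empty_cons (a : String) (l : List String) :
    PySem.Str.join "" (a :: l) = scat a (PySem.Str.join "" l) := by
  rw [← String.toList_inj]
  cases l with
  | nil => simp [PySem.Str.toList_join, PySem.Chars.join_singleton, PySem.Chars.join_nil, scat]
  | cons b t => simp [PySem.Str.toList_join, PySem.Chars.join_cons_cons, scat]

lemma join_empty_pair (a b : String) : PySem.Str.join "" [a, b] = scat a b := by
  rw [join_empty_cons, join_empty_cons, join_empty_nil, scat_empty_right]

-- a loop that ignores its loop variable is an iterate
lemma foldl_ignore_iterate {α β : Type} (G : α → α) (l : List β) (i : α) :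
    l.foldl (fun s _ => G s) i = G^[l.length] i := by
  induction l generalizing i with
  | nil => rfl
  | cons x t ih => simp [List.foldl_cons, ih, Function.iterate_succ_apply]

lemma pyRange_nonpos {p : Int} (h : p ≤ 0) : PySem.List.pyRange 0 p 1 = [] := by
  rw [PySem.List.pyRange_of_pos 0 p (by norm_num)]
  rw [if_neg (by omega)]
  simp

lemma length_pyRange_zero (p : Int) : (PySem.List.pyRange 0 p 1).length = p.toNat := by
  by_cases h : p ≤ 0
  · simp [pyRange_nonpos h]; omega
  · obtain ⟨n, rfl⟩ : ∃ n : Nat, p = (n : Int) := ⟨p.toNat, by omega⟩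
    rw [PySem.List.pyRange_zero_natCast]
    simp

-- Fr is a Counter
lemma pvFr_eq_counter (label : String) : pvFr label = PySem.Dict.counter (pvSplit label) := by
  unfold pvFr
  rw [PySem.List.foldl_congr_mem _ _ (fun d c => d.insert c (d.getD c 0 + 1)) _ ?_]
  · exact PySem.Dict.foldl_insert_getD_add_one_eq_counter _
  · intro d c _
    by_cases h : d.contains c
    · simp only [PySem.Dict.setdefault_of_contains d _ h]
    · simp only [PySem.Dict.setdefault_of_not_contains d _ (by simpa using h)]
      rw [PySem.Dict.getD_insert_self, PySem.Dict.insert_insert_self,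
        PySem.Dict.getD_of_not_contains d _ (by simpa using h)]

lemma go_ne_nil (sep : List Char) (fuel : Nat) :
    ∀ (l cur : List Char) (acc : List (List Char)),
      PySem.Chars.splitOn.go sep fuel l cur acc ≠ [] := by
  induction fuel with
  | zero => intro l cur acc; simp [PySem.Chars.splitOn.go]
  | succ f ih =>
    intro l cur acc
    cases l with
    | nil => simp [PySem.Chars.splitOn.go]
    | cons c rest =>
      rw [PySem.Chars.splitOn.go]
      split_ifs with h1
      · exact ih _ _ _
      · exact ih _ _ _

lemma split_ne_nil (label : String) : pvSplit label ≠ [] := by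
  unfold pvSplit
  simp [PySem.Str.split?, PySem.Chars.split?, PySem.Chars.splitOn]
  intro h
  exact go_ne_nil _ _ _ _ _ h

-- ===== A side =====

-- A's one expansion pass
def pvStep (fs : List (String × Int)) (d : PySem.Dict String Int) : PySem.Dict String Int :=
  d.items.foldl
    (fun tn tv => fs.foldl (fun tn cf => tn.insert (scat cf.1 tv.1) (cf.2 * tv.2)) tn)
    PySem.Dict.empty

lemma stepA_items (fs : List (String × Int)) (d : PySem.Dict String Int) (n : Nat)
    (hd : d.items = pvE fs n) (hnd : ((pvE fs (n + 1)).map Prod.fst).Nodup) :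
    (pvStep fs d).items = pvE fs (n + 1) := by
  unfold pvStep
  rw [hd]
  have hbody : ∀ (tn : PySem.Dict String Int) (tv : String × Int),
      fs.foldl (fun tn cf => tn.insert (scat cf.1 tv.1) (cf.2 * tv.2)) tn
        = (fs.map (fun cf => (scat cf.1 tv.1, cf.2 * tv.2))).foldl
            (fun tn q => tn.insert q.1 q.2) tn := by
    intro tn tv; rw [List.foldl_map]
  rw [PySem.List.foldl_congr_mem _ _
    (fun tn tv => (fs.map (fun cf => (scat cf.1 tv.1, cf.2 * tv.2))).foldl
      (fun tn q => tn.insert q.1 q.2) tn) _ (fun tn tv _ => hbody tn tv)]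
  rw [← List.foldl_flatMap]
  have := PySem.Dict.items_foldl_insert_fresh
    ((pvE fs n).flatMap (fun tv => fs.map (fun cf => (scat cf.1 tv.1, cf.2 * tv.2))))
    Prod.fst Prod.snd PySem.Dict.empty
    (fun a _ => PySem.Dict.contains_empty a.1) (by exact hnd)
  simpa [pvE] using this

lemma A_items (fs : List (String × Int)) (n : Nat)
    (hnd : ∀ m, m ≤ n → ((pvE fs m).map Prod.fst).Nodup) :
    ((pvStep fs)^[n] (PySem.Dict.empty.insert "" 1)).items = pvE fs n := by
  induction n with
  | zero => rfl
  | succ n ih =>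
    rw [Function.iterate_succ_apply']
    exact stepA_items fs _ n (ih (fun m hm => hnd m (le_trans hm (Nat.le_succ n))))
      (hnd (n + 1) le_rfl)

-- ===== B side =====

lemma B_inner (fs : List (String × Int)) (m : Nat) (x : Nat)
    (parts : List String) (val : Int) :
    (PySem.List.pyRange 0 (m : Int) 1).foldl
      (fun (st : List String × Int × Int) _ =>
        let cf := PySem.List.pyGetD fs (PySem.Int.mod st.2.2 (fs.length : Int)) ("", 1)
        (st.1 ++ [cf.1], st.2.1 * cf.2, PySem.Int.floordiv st.2.2 (fs.length : Int)))
      (parts, val, (x : Int))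
    = (parts ++ pvDigs fs fs.length m x, val * pvProd fs fs.length m x,
       ((x / fs.length ^ m : Nat) : Int)) := by
  rw [foldl_ignore_iterate, length_pyRange_zero]
  simp only [Int.toNat_natCast]
  induction m generalizing x parts val with
  | zero => simp [pvDigs, pvProd]
  | succ m ih =>
    rw [Function.iterate_succ_apply]
    have h1 : PySem.Int.mod (x : Int) (fs.length : Int) = ((x % fs.length : Nat) : Int) :=
      PySem.Int.mod_natCast x fs.length
    have h2 : PySem.Int.floordiv (x : Int) (fs.length : Int) = ((x / fs.length : Nat) : Int) :=
      PySem.Int.floordiv_natCast x fs.length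
    simp only [h1, h2, PySem.List.pyGetD_natCast]
    rw [ih (x / fs.length) (parts ++ [(fs.getD (x % fs.length) ("", 1)).1])
      (val * (fs.getD (x % fs.length) ("", 1)).2)]
    refine Prod.ext ?_ (Prod.ext ?_ ?_)
    · simp [pvDigs, List.append_assoc]
    · simp [pvProd, mul_assoc]
    · simp only []
      congr 1
      rw [Nat.div_div_eq_div_mul, ← pow_succ']

lemma range_mul (a k : Nat) :
    List.range (a * k) = (List.range a).flatMap (fun q => (List.range k).map (fun r => q * k + r)) := by
  induction a with
  | zero => simp
  | succ a ih =>
    rw [Nat.succ_mul, List.range_add, ih, List.range_succ, List.flatMap_append]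
    simp

lemma map_getD_range {α : Type} (fs : List α) (d : α) :
    (List.range fs.length).map (fun i => fs.getD i d) = fs := by
  apply List.ext_getElem
  · simp
  · intro i h1 h2
    simp [List.getD_eq_getElem?_getD, List.getElem?_eq_getElem h2]

lemma B_map (fs : List (String × Int)) (hk : 0 < fs.length) (n : Nat) :
    (List.range (fs.length ^ n)).map
      (fun x => (PySem.Str.join "" (pvDigs fs fs.length n x), 1 * pvProd fs fs.length n x))
    = pvE fs n := by
  induction n with
  | zero => simp [pvE, pvDigs, pvProd, join_empty_nil]
  | succ n ih =>
    rw [pow_succ, range_mul, List.map_flatMap]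
    rw [pvE, ← ih, List.flatMap_map]
    refine List.flatMap_congr ?_
    intro q hq
    have hrw : ∀ (g : String × Int → String × Int), fs.map g
        = (List.range fs.length).map (fun i => g (fs.getD i ("", 1))) := by
      intro g
      conv_lhs => rw [← map_getD_range fs ("", 1)]
      rw [List.map_map]
      rfl
    rw [hrw, List.map_map]
    refine List.map_congr_left ?_
    intro r hr
    have hrk : r < fs.length := List.mem_range.mp hr
    have hmod : (q * fs.length + r) % fs.length = r := by
      rw [Nat.add_mod, Nat.mul_mod_left]
      simp [Nat.mod_eq_of_lt hrk]
    have hdiv : (q * fs.length + r) / fs.length = q := by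
      rw [mul_comm, Nat.mul_add_div hk, Nat.div_eq_of_lt hrk]
      omega
    simp only [pvDigs, pvProd, hmod, hdiv, join_empty_cons, Function.comp]
    refine Prod.ext rfl ?_
    simp only []
    ring

set_option maxHeartbeats 1000000 in
lemma B_items (fs : List (String × Int)) (hk : 0 < fs.length) (n : Nat)
    (hnd : ((pvE fs n).map Prod.fst).Nodup) :
    ((PySem.List.pyRange 0 ((fs.length ^ n : Nat) : Int) 1).foldl
      (fun res idx =>
        let st := (PySem.List.pyRange 0 (n : Int) 1).foldl
          (fun (st : List String × Int × Int) _ =>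
            let cf := PySem.List.pyGetD fs (PySem.Int.mod st.2.2 (fs.length : Int)) ("", 1)
            (st.1 ++ [cf.1], st.2.1 * cf.2, PySem.Int.floordiv st.2.2 (fs.length : Int)))
          ([], 1, idx)
        res.insert (PySem.Str.join "" st.1) st.2.1)
      PySem.Dict.empty).items = pvE fs n := by
  rw [PySem.List.foldl_congr_mem _ _
    (fun res (idx : Int) => res.insert (PySem.Str.join "" (pvDigs fs fs.length n idx.toNat))
      (1 * pvProd fs fs.length n idx.toNat)) _ ?_]
  · rw [PySem.List.pyRange_zero_natCast, List.foldl_map]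
    simp only [Int.toNat_natCast]
    have hnd' : ((List.range (fs.length ^ n)).map
        (fun x => PySem.Str.join "" (pvDigs fs fs.length n x))).Nodup := by
      have h := hnd
      rw [← B_map fs hk n, List.map_map] at h
      exact h
    have := PySem.Dict.items_foldl_insert_fresh (List.range (fs.length ^ n))
      (fun x => PySem.Str.join "" (pvDigs fs fs.length n x))
      (fun x => 1 * pvProd fs fs.length n x) PySem.Dict.empty
      (fun a _ => PySem.Dict.contains_empty _) hnd'
    rw [this]
    simpa using B_map fs hk n
  · intro res idx hidx
    have h0 : 0 ≤ idx := (PySem.List.mem_pyRange_one.mp hidx).1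
    obtain ⟨x, rfl⟩ : ∃ x : Nat, idx = (x : Int) := ⟨idx.toNat, by omega⟩
    rw [B_inner fs n x [] 1]
    simp

-- ===== keys: nodup =====

lemma E_nodup_of_prefixFree (fs : List (String × Int))
    (hnd : (fs.map Prod.fst).Nodup)
    (hpf : ∀ a ∈ fs.map Prod.fst, ∀ b ∈ fs.map Prod.fst, a ≠ b → ¬ a.toList <+: b.toList)
    (n : Nat) :
    ((pvE fs n).map Prod.fst).Nodup := by
  induction n with
  | zero => simp [pvE]
  | succ n ih =>
    rw [pvE, List.map_flatMap, List.nodup_flatMap]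
    constructor
    · intro tv _
      have heq : (List.map (Prod.fst ∘ fun cf => (scat cf.1 tv.1, cf.2 * tv.2)) fs)
          = (fs.map Prod.fst).map (fun c => scat c tv.1) := by
        simp [List.map_map, Function.comp]
      rw [List.map_map, heq]
      refine hnd.map ?_
      intro a b hab
      have hlab : a.toList.length = b.toList.length := by
        have := congrArg (fun s => s.toList.length) hab
        simpa [scat, String.toList_ofList] using this
      exact (scat_inj_right hlab hab).1
    · have hpw : (pvE fs n).Pairwise (fun a b => a.1 ≠ b.1) := by
        have h := ih
        rw [List.Nodup, List.pairwise_map] at h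
        exact h
      refine hpw.imp ?_
      intro a b hab
      unfold Function.onFun
      intro x hx1 hx2
      simp only [List.map_map, List.mem_map, Function.comp] at hx1 hx2
      obtain ⟨cf, hcf, rfl⟩ := hx1
      obtain ⟨cf', hcf', heq⟩ := hx2
      have hm1 : cf'.1 ∈ fs.map Prod.fst := List.mem_map_of_mem hcf'
      have hm2 : cf.1 ∈ fs.map Prod.fst := List.mem_map_of_mem hcf
      have := scat_inj_keys (hpf _ hm1 _ hm2) (hpf _ hm2 _ hm1) heq
      exact hab this.2.symm

lemma E_nodup_small (fs : List (String × Int)) (hnd : (fs.map Prod.fst).Nodup)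
    {n : Nat} (hn : n ≤ 1) : ((pvE fs n).map Prod.fst).Nodup := by
  interval_cases n
  · simp [pvE]
  · have : pvE fs 1 = fs.map (fun cf => (scat cf.1 "", cf.2 * 1)) := by
      simp [pvE]
    rw [this, List.map_map]
    have : (Prod.fst ∘ fun cf : String × Int => (scat cf.1 "", cf.2 * 1))
        = Prod.fst := by
      funext cf
      simp [Function.comp, scat_empty_right]
    rw [this]
    exact hnd

-- ===== main =====

lemma main_eq (label : String) (p : Int) (hpre : Pre_get_label_tensor label p) :
    get_label_tensor label p = get_label_tensor_alt label p := by
  unfold get_label_tensor get_label_tensor_alt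
  simp only [pvFr_eq_counter]
  set sp := pvSplit label with hsp
  set fs := (PySem.Dict.counter sp).items with hfs
  have hknd : (fs.map Prod.fst).Nodup := PySem.Dict.nodup_keys_counter sp
  have hkeys : fs.map Prod.fst = PySem.Set.ofList sp := PySem.Dict.keys_counter sp
  have hk : 0 < fs.length := by
    rcases List.exists_mem_of_ne_nil _ (split_ne_nil label) with ⟨s0, hs0⟩
    have : s0 ∈ fs.map Prod.fst := by
      rw [hkeys]; exact (PySem.Set.mem_ofList sp s0).mpr hs0
    have := List.length_pos_of_mem this
    simpa using this
  have hndAll : ∀ m, m ≤ p.toNat → ((pvE fs m).map Prod.fst).Nodup := by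
    rcases hpre with hple | hlen
    · intro m hm
      exact E_nodup_small fs hknd (by omega)
    · intro m _
      refine E_nodup_of_prefixFree fs hknd ?_ m
      intro a ha b hb hne
      have hasp : a ∈ sp := by
        rw [hkeys] at ha
        exact (PySem.Set.mem_ofList sp a).mp ha
      have hbsp : b ∈ sp := by
        rw [hkeys] at hb
        exact (PySem.Set.mem_ofList sp b).mp hb
      exact hlen a hasp b hbsp hne
  -- A's side
  have hA : ((PySem.List.pyRange 0 p 1).foldl
      (fun tensor_old _ =>
        tensor_old.items.foldl
          (fun tensor_new tv =>
            fs.foldl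
              (fun tensor_new cf =>
                tensor_new.insert (PySem.Str.join "" [cf.1, tv.1]) (cf.2 * tv.2))
              tensor_new)
          PySem.Dict.empty)
      (PySem.Dict.empty.insert "" 1)).items = pvE fs p.toNat := by
    have hfun : (fun (tensor_old : PySem.Dict String Int) (_ : Int) =>
        tensor_old.items.foldl
          (fun tensor_new tv =>
            fs.foldl
              (fun tensor_new cf =>
                tensor_new.insert (PySem.Str.join "" [cf.1, tv.1]) (cf.2 * tv.2))
              tensor_new)
          PySem.Dict.empty)
        = (fun d (_ : Int) => pvStep fs d) := by
      funext d e
      unfold pvStep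
      simp only [join_empty_pair]
    rw [hfun, foldl_ignore_iterate (pvStep fs), length_pyRange_zero]
    exact A_items fs p.toNat hndAll
  rw [hA, B_items fs hk p.toNat (hndAll p.toNat le_rfl)]

-- ===== VERDICT (by name: the statement is the Claim_ definition above) =====
theorem get_label_tensor_spec : Claim_equal_get_label_tensor := by
  intro label p _ hpre
  unfold Spec_get_label_tensor
  exact main_eq label p hpre
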